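-- pv_equiv track=rewrite | github.com/teja-d/python | mini_project1.py | create_dictionary_of_info_field_values
-- ===== SOURCE A (Python) =====
-- def create_dictionary_of_info_field_values(data):
--     """
--     You now need to figure out that data types for each of the info fields. Begin by writing a function that first takes the info fields and turns them into a dictionary. Make sure to skip any fields that do not have a value or are missing a value.
--
--     Note: only return keys that have values!
--     """
--
--     # BEGIN SOLUTION
--     data1 = {}
--     counter = 1
--     for i in data:
--         counter += 1
--         l1_data = i.split(';')[:-1]
--         for j in l1_data:
--             if '=' in j:
--                 key, value =  j.strip().split('=',1)
--                 if value=='.':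
--                     continue
--                 if key in data1.keys() and (value not in data1[key]):
--                     data1[key].append(value)
--                 elif key not in data1.keys():
--                     data1[key] = [value]
--     return data1
-- ===== SOURCE B (Python) =====
-- def create_dictionary_of_info_field_values(data):
--     # First pass: collect every value per key (duplicates kept, '.' skipped),
--     # second pass: deduplicate each value list preserving first-appearance order.
--     grouped = {}
--     for i in data:
--         for j in i.split(';')[:-1]:
--             if '=' not in j:
--                 continue
--             key, value = j.strip().split('=', 1)
--             if value != '.':
--                 grouped.setdefault(key, []).append(value)
--     return {k: list(dict.fromkeys(v)) for k, v in grouped.items()}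
-- ===== Notes on version B (the rewrite author's own statement) =====
-- stated objective: alternative
-- what changed: Replaces A's inline membership-checked dedup and key-presence branching with a two-pass collect-then-dedup: setdefault-append gathers all values per key, then each list is deduplicated via dict.fromkeys preserving first-appearance order.
import Mathlib
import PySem

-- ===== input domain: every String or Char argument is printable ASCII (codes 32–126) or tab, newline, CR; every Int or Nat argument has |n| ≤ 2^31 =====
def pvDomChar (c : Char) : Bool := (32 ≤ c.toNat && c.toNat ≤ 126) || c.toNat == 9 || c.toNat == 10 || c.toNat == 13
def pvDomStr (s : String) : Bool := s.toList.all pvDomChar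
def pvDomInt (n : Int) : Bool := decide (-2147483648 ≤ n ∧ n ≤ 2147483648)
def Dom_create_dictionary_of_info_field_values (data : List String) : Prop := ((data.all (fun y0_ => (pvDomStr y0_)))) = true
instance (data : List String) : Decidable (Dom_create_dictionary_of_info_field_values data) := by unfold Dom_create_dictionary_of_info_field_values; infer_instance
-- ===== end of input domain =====

-- B replaces A's inline membership-checked dedup with collect-all-then-dedup in two passes (objective: alternative decomposition, same behaviour).

-- ===== PORT A =====
def create_dictionary_of_info_field_values (data : List String) : List (String × List String) :=
  (data.foldl
    (fun (st : PySem.Dict String (List String) × Int) i =>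
      let data1 := st.1
      let counter := st.2 + 1
      let l1_data := PySem.List.slice ((PySem.Str.split? i ";").getD []) none (some (-1))
      (l1_data.foldl
        (fun data1 j =>
          if PySem.Str.isIn "=" j then
            match PySem.Str.splitMax? (PySem.Str.strip j) "=" 1 with
            | some (key :: value :: _) =>
              if value == "." then data1
              else if data1.contains key && !((data1.getD key []).contains value) then
                data1.modify key [] (fun vs => vs ++ [value])
              else if !(data1.contains key) then
                data1.insert key [value]
              else data1
            | _ => data1   -- unreachable: '=' ∈ j guarantees the split has two parts
          else data1)
        data1, counter))
    (PySem.Dict.empty, 1)).1.items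

-- ===== PORT B =====
def create_dictionary_of_info_field_values_alt (data : List String) : List (String × List String) :=
  let grouped := data.foldl
    (fun grouped i =>
      (PySem.List.slice ((PySem.Str.split? i ";").getD []) none (some (-1))).foldl
        (fun grouped j =>
          if !(PySem.Str.isIn "=" j) then grouped
          else
            -- sep "=" is nonempty, so splitMax? is always `some`; .getD [] only unwraps it
            match (PySem.Str.splitMax? (PySem.Str.strip j) "=" 1).getD [] with
            | [] => grouped      -- unreachable: '=' ∈ j guarantees two parts
            | [_] => grouped     -- unreachable likewise
            | key :: value :: _ =>
              if value != "." then grouped.modify key [] (fun vs => vs ++ [value]) else grouped)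
        grouped)
    PySem.Dict.empty
  grouped.items.map (fun kv => (kv.1, PySem.List.dedup kv.2))

-- ===== PRECONDITION & SPEC =====
def Spec_create_dictionary_of_info_field_values (data : List String) (out : List (String × List String)) : Prop := out = create_dictionary_of_info_field_values_alt data
instance (data : List String) (out : List (String × List String)) : Decidable (Spec_create_dictionary_of_info_field_values data out) := by unfold Spec_create_dictionary_of_info_field_values; infer_instance

-- ===== CLAIM (what is proved, stated in full; the proofs are below) =====
def Claim_equal_create_dictionary_of_info_field_values : Prop := ∀ (data : List String), Dom_create_dictionary_of_info_field_values data → Spec_create_dictionary_of_info_field_values data (create_dictionary_of_info_field_values data)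

-- ===== LEMMAS AND PROOFS =====

-- the (key, value) event a single ';'-field contributes, shared characterisation of both inner-loop bodies
def pvParse (j : String) : Option (String × String) :=
  if PySem.Str.isIn "=" j then
    match PySem.Str.splitMax? (PySem.Str.strip j) "=" 1 with
    | some (key :: value :: _) => if value == "." then none else some (key, value)
    | _ => none
  else none

def pvAStep (d : PySem.Dict String (List String)) (e : String × String) : PySem.Dict String (List String) :=
  if d.contains e.1 && !((d.getD e.1 []).contains e.2) then d.modify e.1 [] (fun vs => vs ++ [e.2])
  else if !(d.contains e.1) then d.insert e.1 [e.2]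
  else d

def pvBStep (g : PySem.Dict String (List String)) (e : String × String) : PySem.Dict String (List String) :=
  g.modify e.1 [] (fun vs => vs ++ [e.2])

def pvEvents (i : String) : List (String × String) :=
  (PySem.List.slice ((PySem.Str.split? i ";").getD []) none (some (-1))).filterMap pvParse

-- dedup-image of a grouped dict: what A's running dict is in terms of B's
def pvMapDedup (g : PySem.Dict String (List String)) : PySem.Dict String (List String) :=
  PySem.Dict.mk (g.items.map (fun p => (p.1, PySem.List.dedup p.2)))

theorem pvInnerA (l : List String) (d : PySem.Dict String (List String)) :
    l.foldl
      (fun data1 j =>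
        if PySem.Str.isIn "=" j then
          match PySem.Str.splitMax? (PySem.Str.strip j) "=" 1 with
          | some (key :: value :: _) =>
            if value == "." then data1
            else if data1.contains key && !((data1.getD key []).contains value) then
              data1.modify key [] (fun vs => vs ++ [value])
            else if !(data1.contains key) then
              data1.insert key [value]
            else data1
          | _ => data1
        else data1) d
    = (l.filterMap pvParse).foldl pvAStep d := by
  induction l generalizing d with
  | nil => rfl
  | cons j l ih =>
    simp only [List.foldl_cons, List.filterMap_cons]
    have hb : (if PySem.Str.isIn "=" j then
          match PySem.Str.splitMax? (PySem.Str.strip j) "=" 1 with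
          | some (key :: value :: _) =>
            if value == "." then d
            else if d.contains key && !((d.getD key []).contains value) then
              d.modify key [] (fun vs => vs ++ [value])
            else if !(d.contains key) then
              d.insert key [value]
            else d
          | _ => d
        else d) = match pvParse j with | none => d | some e => pvAStep d e := by
      unfold pvParse
      by_cases h : PySem.Str.isIn "=" j = true <;> simp only [h, if_true, if_false, Bool.false_eq_true]
      · rcases hs : PySem.Str.splitMax? (PySem.Str.strip j) "=" 1 with _ | ⟨_ | ⟨key, _ | ⟨value, rest⟩⟩⟩ <;>
          simp only []
        by_cases hv : value == "." <;> simp [hv, pvAStep]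
    rw [hb]
    cases pvParse j <;> exact ih _

theorem pvInnerB (l : List String) (g : PySem.Dict String (List String)) :
    l.foldl
      (fun grouped j =>
        if !(PySem.Str.isIn "=" j) then grouped
        else
          match (PySem.Str.splitMax? (PySem.Str.strip j) "=" 1).getD [] with
          | [] => grouped
          | [_] => grouped
          | key :: value :: _ =>
            if value != "." then grouped.modify key [] (fun vs => vs ++ [value]) else grouped) g
    = (l.filterMap pvParse).foldl pvBStep g := by
  induction l generalizing g with
  | nil => rfl
  | cons j l ih =>
    simp only [List.foldl_cons, List.filterMap_cons]
    have hb : (if !(PySem.Str.isIn "=" j) then g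
        else
          match (PySem.Str.splitMax? (PySem.Str.strip j) "=" 1).getD [] with
          | [] => g
          | [_] => g
          | key :: value :: _ =>
            if value != "." then g.modify key [] (fun vs => vs ++ [value]) else g) = match pvParse j with | none => g | some e => pvBStep g e := by
      unfold pvParse
      by_cases h : PySem.Str.isIn "=" j = true <;> simp only [h, Bool.not_true, Bool.not_false, if_true, if_false, Bool.false_eq_true]
      · rcases hs : PySem.Str.splitMax? (PySem.Str.strip j) "=" 1 with _ | ⟨_ | ⟨key, _ | ⟨value, rest⟩⟩⟩ <;>
          simp only [Option.getD_some, Option.getD_none]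
        by_cases hv : value == "." <;> simp [bne, hv, pvBStep]
    rw [hb]
    cases pvParse j <;> exact ih _

theorem pvContains_mapDedup (g : PySem.Dict String (List String)) (k : String) :
    (pvMapDedup g).contains k = g.contains k := by
  simp [pvMapDedup, PySem.Dict.contains, List.any_map, Function.comp_def]

theorem pvGet?_mapDedup (g : PySem.Dict String (List String)) (k : String) :
    (pvMapDedup g).get? k = (g.get? k).map PySem.List.dedup := by
  simp [pvMapDedup, PySem.Dict.get?, List.find?_map, Function.comp_def, Option.map_map]

theorem pvDedup_append_mem {v : String} {vs : List String} (h : v ∈ vs) :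
    PySem.List.dedup (vs ++ [v]) = PySem.List.dedup vs := by
  have hadd : PySem.List.dedup (vs ++ [v]) = PySem.Set.add (PySem.List.dedup vs) v := by
    simp [PySem.List.dedup, PySem.Set.ofList_eq_foldl]
  rw [hadd, PySem.Set.add]
  have : PySem.Set.contains (PySem.List.dedup vs) v = true := by
    rw [PySem.Set.contains_eq_listContains]
    simp [h]
  simp [h]

theorem pvDedup_append_not_mem {v : String} {vs : List String} (h : v ∉ vs) :
    PySem.List.dedup (vs ++ [v]) = PySem.List.dedup vs ++ [v] := by
  have hadd : PySem.List.dedup (vs ++ [v]) = PySem.Set.add (PySem.List.dedup vs) v := by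
    simp [PySem.List.dedup, PySem.Set.ofList_eq_foldl]
  rw [hadd, PySem.Set.add]
  have : PySem.Set.contains (PySem.List.dedup vs) v = false := by
    rw [PySem.Set.contains_eq_listContains]
    simp [h]
  simp [h]

theorem pvStep (g : PySem.Dict String (List String)) (e : String × String)
    (hnd : g.keys.Nodup) :
    pvAStep (pvMapDedup g) e = pvMapDedup (pvBStep g e) := by
  obtain ⟨k, v⟩ := e
  simp only [pvAStep, pvBStep, PySem.Dict.modify]
  by_cases hc : g.contains k = true
  · rcases hq : g.get? k with _ | vs
    · rw [PySem.Dict.contains_eq_isSome_get?, hq] at hc; simp at hc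
    · have hgd : g.getD k [] = vs := by simp [PySem.Dict.getD, hq]
      have hcM : (pvMapDedup g).contains k = true := by rw [pvContains_mapDedup]; exact hc
      have hgM : (pvMapDedup g).getD k [] = PySem.List.dedup vs := by
        simp [PySem.Dict.getD, pvGet?_mapDedup, hq]
      by_cases hm : v ∈ vs
      · have hdc : (PySem.List.dedup vs).contains v = true := by
          simp [hm]
        rw [hcM, hgM, hdc]
        simp only [Bool.not_true, Bool.and_false, Bool.false_eq_true, if_false]
        -- A leaves its dict unchanged; B's append is erased by dedup
        apply PySem.Dict.ext
        simp only [pvMapDedup]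
        rw [hgd, PySem.Dict.items_insert_of_contains g _ hc]
        show g.items.map (fun p => (p.1, PySem.List.dedup p.2))
           = ((g.items.map (fun p => if (p.1 == k) = true then (k, vs ++ [v]) else p)).map
               (fun p => (p.1, PySem.List.dedup p.2)))
        rw [List.map_map]
        refine (List.map_congr_left (fun p hp => ?_)).symm
        by_cases hpk : (p.1 == k) = true
        · have hk : p.1 = k := by exact eq_of_beq hpk
          have hvv : g.get? p.1 = some p.2 := PySem.Dict.get?_of_mem_items g (by simpa using hp) hnd
          rw [hk, hq] at hvv
          have hpv : p.2 = vs := by injection hvv.symm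
          simp only [Function.comp, hk, hpv, beq_self_eq_true, if_true]
          rw [pvDedup_append_mem hm]
        · simp [Function.comp, hpk]
      · have hdc : (PySem.List.dedup vs).contains v = false := by
          simp [hm]
        rw [hcM, hgM, hdc]
        simp only [Bool.not_false, Bool.and_true, if_true]
        -- both sides append v at key k; dedup of the appended list keeps it
        rw [hgd]
        apply PySem.Dict.ext
        rw [PySem.Dict.items_insert_of_contains _ _ hcM]
        simp only [pvMapDedup]
        rw [PySem.Dict.items_insert_of_contains g _ hc]
        show ((g.items.map (fun p => (p.1, PySem.List.dedup p.2))).map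
                (fun p => if (p.1 == k) = true then (k, PySem.List.dedup vs ++ [v]) else p))
           = ((g.items.map (fun p => if (p.1 == k) = true then (k, vs ++ [v]) else p)).map
                (fun p => (p.1, PySem.List.dedup p.2)))
        rw [List.map_map, List.map_map]
        refine List.map_congr_left (fun p hp => ?_)
        by_cases hpk : (p.1 == k) = true
        · simp only [Function.comp, hpk]
          simp only [if_true]
          simp
          exact (pvDedup_append_not_mem hm).symm
        · simp [Function.comp, hpk]
  · have hc' : g.contains k = false := by simpa using hc
    have hcM : (pvMapDedup g).contains k = false := by rw [pvContains_mapDedup]; exact hc'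
    rw [hcM, PySem.Dict.getD_of_not_contains g _ hc']
    simp only [Bool.false_and, Bool.false_eq_true, if_false, Bool.not_false, if_true,
      List.nil_append]
    apply PySem.Dict.ext
    rw [PySem.Dict.items_insert_of_not_contains _ _ hcM]
    simp only [pvMapDedup]
    rw [PySem.Dict.items_insert_of_not_contains g _ hc']
    show (g.items.map (fun p => (p.1, PySem.List.dedup p.2)) ++ [(k, [v])])
       = ((g.items ++ [(k, [v])]).map (fun p => (p.1, PySem.List.dedup p.2)))
    have hone : PySem.List.dedup [v] = [v] := by
      simp [PySem.List.dedup, PySem.Set.ofList_eq_foldl, PySem.Set.add]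
    simp
    exact hone.symm

theorem pvNodupB (g : PySem.Dict String (List String)) (e : String × String)
    (hnd : g.keys.Nodup) :
    (pvBStep g e).keys.Nodup := by
  exact PySem.Dict.nodup_keys_insert _ _ _ hnd

theorem pvMain (events : List (String × String)) (g : PySem.Dict String (List String))
    (hnd : g.keys.Nodup) :
    events.foldl pvAStep (pvMapDedup g) = pvMapDedup (events.foldl pvBStep g) := by
  induction events generalizing g with
  | nil => rfl
  | cons e es ih =>
    simp only [List.foldl_cons, pvStep g e hnd]
    exact ih _ (pvNodupB g e hnd)

theorem pvNodupFold (events : List (String × String)) (g : PySem.Dict String (List String))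
    (hnd : g.keys.Nodup) :
    (events.foldl pvBStep g).keys.Nodup := by
  induction events generalizing g with
  | nil => exact hnd
  | cons e es ih => exact ih _ (pvNodupB g e hnd)

theorem pvOuterA (data : List String) : ∀ (d : PySem.Dict String (List String)) (c : Int),
    (data.foldl
      (fun (st : PySem.Dict String (List String) × Int) i =>
        let data1 := st.1
        let counter := st.2 + 1
        let l1_data := PySem.List.slice ((PySem.Str.split? i ";").getD []) none (some (-1))
        (l1_data.foldl
          (fun data1 j =>
            if PySem.Str.isIn "=" j then
              match PySem.Str.splitMax? (PySem.Str.strip j) "=" 1 with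
              | some (key :: value :: _) =>
                if value == "." then data1
                else if data1.contains key && !((data1.getD key []).contains value) then
                  data1.modify key [] (fun vs => vs ++ [value])
                else if !(data1.contains key) then
                  data1.insert key [value]
                else data1
              | _ => data1
            else data1)
          data1, counter)) (d, c)).1
    = data.foldl (fun d i => (pvEvents i).foldl pvAStep d) d := by
  induction data with
  | nil => intro d c; rfl
  | cons i data ih =>
    intro d c
    simp only [List.foldl_cons]
    rw [ih]
    rw [pvInnerA]
    rfl

theorem pvOuterB (data : List String) : ∀ (g : PySem.Dict String (List String)),
    data.foldl
      (fun grouped i =>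
        (PySem.List.slice ((PySem.Str.split? i ";").getD []) none (some (-1))).foldl
          (fun grouped j =>
            if !(PySem.Str.isIn "=" j) then grouped
            else
              match (PySem.Str.splitMax? (PySem.Str.strip j) "=" 1).getD [] with
              | [] => grouped
              | [_] => grouped
              | key :: value :: _ =>
                if value != "." then grouped.modify key [] (fun vs => vs ++ [value]) else grouped)
          grouped) g
    = data.foldl (fun g i => (pvEvents i).foldl pvBStep g) g := by
  induction data with
  | nil => intro g; rfl
  | cons i data ih =>
    intro g
    simp only [List.foldl_cons]
    rw [pvInnerB, ih]
    rfl

theorem pvFoldMain (data : List String) : ∀ (g : PySem.Dict String (List String)),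
    g.keys.Nodup →
    data.foldl (fun d i => (pvEvents i).foldl pvAStep d) (pvMapDedup g)
      = pvMapDedup (data.foldl (fun g i => (pvEvents i).foldl pvBStep g) g) := by
  induction data with
  | nil => intro g _; rfl
  | cons i data ih =>
    intro g hnd
    simp only [List.foldl_cons]
    rw [pvMain (pvEvents i) g hnd]
    exact ih _ (pvNodupFold (pvEvents i) g hnd)

-- ===== VERDICT (by name: the statement is the Claim_ definition above) =====
theorem create_dictionary_of_info_field_values_spec : Claim_equal_create_dictionary_of_info_field_values := by
  intro data _
  unfold Spec_create_dictionary_of_info_field_values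
  unfold create_dictionary_of_info_field_values create_dictionary_of_info_field_values_alt
  rw [pvOuterA, pvOuterB]
  have hnd : (PySem.Dict.empty : PySem.Dict String (List String)).keys.Nodup := by
    simp [PySem.Dict.empty, PySem.Dict.keys]
  have hme : pvMapDedup (PySem.Dict.empty : PySem.Dict String (List String)) = PySem.Dict.empty := rfl
  rw [← hme, pvFoldMain data PySem.Dict.empty hnd]
  rfl
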